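-- pv_equiv track=rewrite | github.com/denisschmidt/leetcode | leetcode/search/1665. Minimum Initial Energy to Finish Tasks/py/main.py | calc
-- ===== SOURCE A (Python) =====
-- def calc(nums, energy):
--   for i in reversed(range(len(nums))):
--     x, y = nums[i]
--
--     if energy - y >= 0:
--       energy -= x
--     else:
--       return False
--   return True
-- ===== SOURCE B (Python) =====
-- def calc(nums, energy):
--     # table-then-check: spent[k] = total x-cost of the k tasks processed before
--     # (tasks are processed in reverse list order)
--     spent = [0]
--     for x, _ in reversed(nums):
--         spent.append(spent[-1] + x)
--     return all(energy - s >= y for (_, y), s in zip(reversed(nums), spent))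
-- ===== Notes on version B (the rewrite author's own statement) =====
-- stated objective: alternative
-- what changed: Replaces the stateful simulate-and-early-return loop with a two-phase table-then-check: first a prefix-sum table of x-costs over the reversed order, then an all() over (task, spent-so-far) pairs.
import Mathlib
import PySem

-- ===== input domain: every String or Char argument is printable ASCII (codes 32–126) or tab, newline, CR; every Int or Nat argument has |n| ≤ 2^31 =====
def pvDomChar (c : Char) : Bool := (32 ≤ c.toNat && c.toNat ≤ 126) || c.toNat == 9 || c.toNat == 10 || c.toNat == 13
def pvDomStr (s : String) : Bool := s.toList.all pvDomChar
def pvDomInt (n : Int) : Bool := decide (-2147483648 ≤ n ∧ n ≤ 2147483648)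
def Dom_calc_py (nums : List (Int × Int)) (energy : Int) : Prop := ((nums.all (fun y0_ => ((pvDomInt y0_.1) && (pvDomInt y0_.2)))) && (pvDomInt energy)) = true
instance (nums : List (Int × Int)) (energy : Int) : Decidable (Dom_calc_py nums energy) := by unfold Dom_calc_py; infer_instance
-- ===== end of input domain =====

-- B replaces A's simulate-with-mutable-energy early-return loop by a prefix-sum
-- table of x-costs (reverse order) followed by an all-check; alternative
-- decomposition, same cost.

-- ===== PORT A =====
-- A's loop over reversed(range(len(nums))), mutating energy, early-return False.
def calcAuxA : List (Int × Int) → Int → Bool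
  | [], _ => true
  | (x, y) :: rest, energy =>
    if energy - y ≥ 0 then calcAuxA rest (energy - x) else false

def calc_py (nums : List (Int × Int)) (energy : Int) : Bool :=
  calcAuxA nums.reverse energy

-- ===== PORT B =====
-- Source B: spent = prefix sums of x over reversed(nums) (scanl), then all().
def calc_py_alt (nums : List (Int × Int)) (energy : Int) : Bool :=
  let rev := nums.reverse
  let spent := (rev.map Prod.fst).scanl (· + ·) 0
  (rev.zip spent).all (fun q => decide (energy - q.2 ≥ q.1.2))

-- ===== PRECONDITION & SPEC =====
def Spec_calc_py (nums : List (Int × Int)) (energy : Int) (out : Bool) : Prop := out = calc_py_alt nums energy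
instance (nums : List (Int × Int)) (energy : Int) (out : Bool) : Decidable (Spec_calc_py nums energy out) := by unfold Spec_calc_py; infer_instance

-- ===== CLAIM (what is proved, stated in full; the proofs are below) =====
def Claim_equal_calc_py : Prop := ∀ (nums : List (Int × Int)) (energy : Int), Dom_calc_py nums energy → Spec_calc_py nums energy (calc_py nums energy)

-- ===== LEMMAS AND PROOFS =====

theorem calcAuxA_eq_scan (l : List (Int × Int)) (e s : Int) :
    calcAuxA l e
      = (l.zip ((l.map Prod.fst).scanl (· + ·) s)).all
          (fun q => decide (e + s - q.2 ≥ q.1.2)) := by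
  induction l generalizing e s with
  | nil => simp [calcAuxA]
  | cons hd tl ih =>
    obtain ⟨x, y⟩ := hd
    simp only [calcAuxA, List.map_cons, List.scanl_cons, List.zip_cons_cons, List.all_cons]
    have h := ih (e - x) (s + x)
    have harith : e - x + (s + x) = e + s := by ring
    rw [harith] at h
    by_cases hc : y ≤ e
    · have hc' : e - y ≥ 0 := by omega
      simp [hc', h]
    · have hc' : ¬ (e - y ≥ 0) := by omega
      simp [hc, hc']

-- ===== VERDICT (by name: the statement is the Claim_ definition above) =====
theorem calc_py_spec : Claim_equal_calc_py := by
  intro nums energy _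
  show calc_py nums energy = calc_py_alt nums energy
  unfold calc_py calc_py_alt
  have h := calcAuxA_eq_scan nums.reverse energy 0
  simpa using h
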